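-- pv_equiv track=rewrite | github.com/httpsDr3aMy/cryptography | szyfr_ottendorfa.py | ottendorf_kodowanie
-- ===== SOURCE A (Python) =====
-- import string
--
-- def ottendorf_kodowanie(tekst, klucz):
--     # usuwanie wszystkich spacji i innych znaków niebędących literami
--     tekst = ''.join(litera for litera in tekst if litera.isalpha())
--
--     # usuwanie liter "j" z klucza i zamiana go na "i"
--     klucz = klucz.replace('j', '').lower() + string.ascii_lowercase.replace('j', '')
--
--     zaszyfrowany_tekst = ""
--     for slowo in [tekst[i:i+5] for i in range(0, len(tekst), 5)]:
--         # zamiana każdej litery na odpowiadającą jej liczbę z zakresu 0-24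
--         slowo_liczby = [klucz.index(litera.lower()) for litera in slowo]
--
--         # połączenie liczb w jedną ciągłą liczbę i dodanie do zaszyfrowanego tekstu
--         zaszyfrowany_tekst += " ".join(str(liczba) for liczba in slowo_liczby) + " "
--     return zaszyfrowany_tekst.strip()
-- ===== SOURCE B (Python) =====
-- def ottendorf_kodowanie(tekst, klucz):
--     # cleaned key: klucz without its 'j's, lowercased (what A prepends to the alphabet)
--     kl = klucz.replace('j', '').lower()
--
--     def kod(c):
--         # first occurrence in the cleaned key, otherwise a closed-form position in the
--         # j-less alphabet tail: len(kl) + alphabet offset (letters past 'j' shift down by 1)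
--         if c in kl:
--             return kl.index(c)
--         return len(kl) + ord(c) - ord('a') - (1 if c > 'j' else 0)
--
--     return ' '.join(str(kod(c.lower())) for c in tekst if c.isalpha())
-- ===== Notes on version B (the rewrite author's own statement) =====
-- stated objective: alternative
-- what changed: B never builds A's concatenated key+alphabet string and never chunks the text in groups of five: it looks each letter up in the cleaned key alone and, when absent, computes its position in the appended j-less alphabet by ord() arithmetic (a closed form instead of scanning the alphabet), joining one flat pass over the letters instead of A's chunk loop with trailing-space-then-strip assembly.
import Mathlib
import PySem

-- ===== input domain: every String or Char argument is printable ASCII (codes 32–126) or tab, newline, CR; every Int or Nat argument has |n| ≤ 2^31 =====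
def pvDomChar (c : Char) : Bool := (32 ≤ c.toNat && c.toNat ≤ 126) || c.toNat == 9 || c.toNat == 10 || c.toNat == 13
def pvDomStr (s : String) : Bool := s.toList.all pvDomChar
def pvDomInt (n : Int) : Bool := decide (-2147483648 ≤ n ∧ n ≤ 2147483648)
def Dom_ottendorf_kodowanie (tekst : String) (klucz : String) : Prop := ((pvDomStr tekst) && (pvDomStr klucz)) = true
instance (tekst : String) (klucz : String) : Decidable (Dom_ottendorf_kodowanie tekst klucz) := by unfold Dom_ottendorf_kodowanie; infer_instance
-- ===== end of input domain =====

-- B never builds A's concatenated key+alphabet string: it looks a letter up in the cleaned key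
-- alone and otherwise computes its position in the appended j-less alphabet by ord() arithmetic,
-- in one flat pass instead of A's group-of-5 chunking with trailing-space-then-strip assembly.

-- ===== PORT A =====
def ottendorf_kodowanie (tekst : String) (klucz : String) : String :=
  -- tekst = ''.join(litera for litera in tekst if litera.isalpha())
  let t := tekst.toList.filter (fun litera => PySem.Chars.isalpha litera)
  -- klucz = klucz.replace('j', '').lower() + string.ascii_lowercase.replace('j', '')
  let k := PySem.Chars.lower (PySem.Chars.replace klucz.toList ['j'] []) ++
           PySem.Chars.replace "abcdefghijklmnopqrstuvwxyz".toList ['j'] []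
  -- for slowo in [tekst[i:i+5] for i in range(0, len(tekst), 5)]: …
  let z := (PySem.List.pyRange 0 (t.length : Int) 5).foldl
    (fun acc i =>
      let slowo := PySem.List.slice t (some i) (some (i + 5))
      -- klucz.index(litera.lower()); .getD 0 is unreachable on Pre_ (ValueError excluded)
      let slowo_liczby := slowo.map
        (fun litera => ((PySem.List.index? k (PySem.Chars.lowerChar litera)).getD 0 : Int))
      acc ++ PySem.Chars.join [' '] (slowo_liczby.map (fun liczba => PySem.Int.toChars liczba)) ++ [' ']) []
  String.ofList (PySem.Chars.strip z)

-- ===== PORT B =====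
-- def kod(c): if c in kl: return kl.index(c)
--             return len(kl) + ord(c) - ord('a') - (1 if c > 'j' else 0)
def pvKod (kl : List Char) (c : Char) : Int :=
  match PySem.List.index? kl c with
  | some i => (i : Int)
  | none => (kl.length : Int) + (c.toNat : Int) - 97 - (if 'j' < c then 1 else 0)

def ottendorf_kodowanie_alt (tekst : String) (klucz : String) : String :=
  -- kl = klucz.replace('j', '').lower()
  let kl := PySem.Chars.lower (PySem.Chars.replace klucz.toList ['j'] [])
  -- ' '.join(str(kod(c.lower())) for c in tekst if c.isalpha())
  String.ofList (PySem.Chars.join [' ']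
    ((tekst.toList.filter (fun c => PySem.Chars.isalpha c)).map
      (fun c => PySem.Int.toChars (pvKod kl (PySem.Chars.lowerChar c)))))

-- ===== PRECONDITION & SPEC =====
-- Pre_ excludes exactly the inputs where A raises ValueError: a letter 'j'/'J' occurs in tekst
-- while klucz contains no 'J' (lowercase 'j' is deleted from the key, so only an uppercase 'J'
-- in klucz keeps 'j' findable).
def Pre_ottendorf_kodowanie (tekst : String) (klucz : String) : Prop :=
  ('j' ∈ tekst.toList ∨ 'J' ∈ tekst.toList) → 'J' ∈ klucz.toList
instance (tekst : String) (klucz : String) : Decidable (Pre_ottendorf_kodowanie tekst klucz) := by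
  unfold Pre_ottendorf_kodowanie; infer_instance

def pvWitness_ottendorf_kodowanie : String × String := ("Ala ma kota", "tajne")

def Spec_ottendorf_kodowanie (tekst : String) (klucz : String) (out : String) : Prop :=
  out = ottendorf_kodowanie_alt tekst klucz
instance (tekst : String) (klucz : String) (out : String) : Decidable (Spec_ottendorf_kodowanie tekst klucz out) := by
  unfold Spec_ottendorf_kodowanie; infer_instance

-- ===== CLAIM (what is proved, stated in full; the proofs are below) =====
def Claim_equal_ottendorf_kodowanie : Prop := ∀ (tekst : String) (klucz : String), Dom_ottendorf_kodowanie tekst klucz → Pre_ottendorf_kodowanie tekst klucz → Spec_ottendorf_kodowanie tekst klucz (ottendorf_kodowanie tekst klucz)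

-- ===== LEMMAS AND PROOFS =====

-- range(a, b, 5) is empty when b ≤ a
theorem pvRange5_nil (a b : Int) (h : b ≤ a) : PySem.List.pyRange a b 5 = [] := by
  rw [PySem.List.pyRange_of_pos _ _ (by norm_num : (0:Int) < 5)]
  rw [if_neg (by omega)]
  simp

-- range(a, b, 5) peels its first element when a < b
theorem pvRange5_cons (a b : Int) (h : a < b) :
    PySem.List.pyRange a b 5 = a :: PySem.List.pyRange (a + 5) b 5 := by
  rw [PySem.List.pyRange_of_pos _ _ (by norm_num : (0:Int) < 5),
      PySem.List.pyRange_of_pos _ _ (by norm_num : (0:Int) < 5)]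
  rw [if_pos h]
  rw [show ((b - a + 5 - 1) / 5).toNat
      = (if a + 5 < b then ((b - (a + 5) + 5 - 1) / 5).toNat else 0) + 1 from by
        split <;> omega]
  rw [List.range_succ_eq_map]
  simp only [List.map_cons, Nat.cast_zero, mul_zero, add_zero, List.map_map]
  refine congrArg (a :: ·) ?_
  apply List.map_congr_left
  intro x _
  simp only [Function.comp_apply, Nat.succ_eq_add_one]
  push_cast
  ring

-- ' '.join distributes over ++ of nonempty part lists
theorem pvJoin_append (xs ys : List (List Char)) (hx : xs ≠ []) (hy : ys ≠ []) :
    PySem.Chars.join [' '] (xs ++ ys) =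
      PySem.Chars.join [' '] xs ++ [' '] ++ PySem.Chars.join [' '] ys := by
  induction xs with
  | nil => exact absurd rfl hx
  | cons p xs ih =>
    cases xs with
    | nil =>
      cases ys with
      | nil => exact absurd rfl hy
      | cons q ys' =>
        simp only [List.singleton_append]
        rw [PySem.Chars.join_cons_cons, PySem.Chars.join_singleton]
    | cons p2 xs' =>
      simp only [List.cons_append]
      rw [PySem.Chars.join_cons_cons, PySem.Chars.join_cons_cons,
          show p2 :: (xs' ++ ys) = (p2 :: xs') ++ ys from rfl,
          ih (by simp)]
      simp [List.append_assoc]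

-- Nat.digitChar never yields whitespace
theorem pvDigitChar_ns (m : Nat) (h : m < 10) : PySem.Chars.isspace (Nat.digitChar m) = false := by
  interval_cases m <;> decide

-- every char Nat.toDigitsCore emits is non-space, and the result is nonempty
theorem pvToDigitsCore_ns : ∀ (f n : Nat) (ds : List Char),
    (∀ c ∈ ds, PySem.Chars.isspace c = false) →
    (∀ c ∈ Nat.toDigitsCore 10 f n ds, PySem.Chars.isspace c = false) ∧
      ((ds ≠ [] ∨ f ≠ 0) → Nat.toDigitsCore 10 f n ds ≠ []) := by
  intro f
  induction f with
  | zero =>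
    intro n ds hds
    refine ⟨by simpa [Nat.toDigitsCore] using hds, ?_⟩
    rintro (h | h)
    · simpa [Nat.toDigitsCore] using h
    · simp at h
  | succ f ih =>
    intro n ds hds
    have hd : PySem.Chars.isspace ((n % 10).digitChar) = false := pvDigitChar_ns _ (Nat.mod_lt _ (by norm_num))
    have hds' : ∀ c ∈ (n % 10).digitChar :: ds, PySem.Chars.isspace c = false := by
      intro c hc
      rcases List.mem_cons.mp hc with rfl | hc
      · exact hd
      · exact hds c hc
    simp only [Nat.toDigitsCore]
    split
    · exact ⟨hds', by simp⟩
    · have h2 := ih (n / 10) ((n % 10).digitChar :: ds) hds'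
      exact ⟨h2.1, fun _ => h2.2 (Or.inl (by simp))⟩

-- str(n) for a natural n: nonempty, no whitespace
theorem pvToChars_ns (n : Nat) :
    PySem.Int.toChars (n : Int) ≠ [] ∧ ∀ c ∈ PySem.Int.toChars (n : Int), PySem.Chars.isspace c = false := by
  have h0 : ¬ ((n : Int) < 0) := by omega
  unfold PySem.Int.toChars
  rw [if_neg h0]
  unfold Nat.toDigits
  have h := pvToDigitsCore_ns ((n : Int).toNat + 1) (n : Int).toNat []
    (by intro c hc; simp at hc)
  exact ⟨h.2 (Or.inr (by simp)), h.1⟩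

-- head of a ' '-join of good parts is non-space
theorem pvJoin_head (parts : List (List Char)) (h : parts ≠ [])
    (hp : ∀ p ∈ parts, p ≠ [] ∧ ∀ c ∈ p, PySem.Chars.isspace c = false) :
    ∃ c s', PySem.Chars.join [' '] parts = c :: s' ∧ PySem.Chars.isspace c = false := by
  cases parts with
  | nil => exact absurd rfl h
  | cons p rest =>
    obtain ⟨hp1, hp2⟩ := hp p (by simp)
    obtain ⟨c, p', rfl⟩ : ∃ c p', p = c :: p' := by
      cases p with
      | nil => exact absurd rfl hp1
      | cons c p' => exact ⟨c, p', rfl⟩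
    cases rest with
    | nil => exact ⟨c, p', by rw [PySem.Chars.join_singleton], hp2 c (by simp)⟩
    | cons q rest' =>
      refine ⟨c, p' ++ [' '] ++ PySem.Chars.join [' '] (q :: rest'), ?_, hp2 c (by simp)⟩
      rw [PySem.Chars.join_cons_cons]
      simp

-- last of a ' '-join of good parts is non-space
theorem pvJoin_last (parts : List (List Char)) (h : parts ≠ [])
    (hp : ∀ p ∈ parts, p ≠ [] ∧ ∀ c ∈ p, PySem.Chars.isspace c = false) :
    ∃ c, (PySem.Chars.join [' '] parts).getLast? = some c ∧ PySem.Chars.isspace c = false := by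
  induction parts with
  | nil => exact absurd rfl h
  | cons p rest ih =>
    cases rest with
    | nil =>
      obtain ⟨hp1, hp2⟩ := hp p (by simp)
      refine ⟨p.getLast hp1, ?_, hp2 _ (List.getLast_mem hp1)⟩
      rw [PySem.Chars.join_singleton]
      exact List.getLast?_eq_some_getLast hp1
    | cons q rest' =>
      obtain ⟨c, hc, hcs⟩ := ih (by simp) (fun p hp' => hp p (by simp [hp']))
      refine ⟨c, ?_, hcs⟩
      rw [PySem.Chars.join_cons_cons, List.append_assoc, List.getLast?_append,
          List.getLast?_append, hc]
      simp

-- strip of (join ++ " ") gives back the join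
theorem pvStrip_join (parts : List (List Char)) (h : parts ≠ [])
    (hp : ∀ p ∈ parts, p ≠ [] ∧ ∀ c ∈ p, PySem.Chars.isspace c = false) :
    PySem.Chars.strip (PySem.Chars.join [' '] parts ++ [' ']) = PySem.Chars.join [' '] parts := by
  obtain ⟨c, s', hJ, hc⟩ := pvJoin_head parts h hp
  obtain ⟨lc, hlast, hlc⟩ := pvJoin_last parts h hp
  have hrev : PySem.Chars.rstrip (PySem.Chars.join [' '] parts ++ [' ']) =
      PySem.Chars.join [' '] parts := by
    unfold PySem.Chars.rstrip
    rw [List.reverse_append]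
    simp only [List.reverse_singleton, List.singleton_append]
    rw [List.dropWhile_cons, if_pos (by decide : PySem.Chars.isspace ' ' = true)]
    have hh : (PySem.Chars.join [' '] parts).reverse.head? = some lc := by
      rw [List.head?_reverse]
      exact hlast
    cases hrev2 : (PySem.Chars.join [' '] parts).reverse with
    | nil => rw [hrev2] at hh; simp at hh
    | cons a as =>
      rw [hrev2] at hh
      simp only [List.head?_cons, Option.some.injEq] at hh
      subst hh
      rw [List.dropWhile_cons, if_neg (by simp [hlc])]
      rw [← hrev2, List.reverse_reverse]
  unfold PySem.Chars.strip PySem.Chars.lstrip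
  rw [hJ]
  rw [List.cons_append, List.dropWhile_cons, if_neg (by simp [hc]), ← List.cons_append, ← hJ]
  exact hrev

-- A's chunked fold over range(a, len, 5) flattens to one join plus a trailing space
theorem pvChunkFold (f : Char → List Char) (t : List Char) :
    ∀ (m a : Nat) (acc : List Char), t.length ≤ a + m → a < t.length →
    (PySem.List.pyRange (a : Int) (t.length : Int) 5).foldl
      (fun acc i => acc ++
        PySem.Chars.join [' '] ((PySem.List.slice t (some i) (some (i + 5))).map f) ++ [' ']) acc
    = acc ++ PySem.Chars.join [' '] ((t.drop a).map f) ++ [' '] := by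
  intro m
  induction m with
  | zero => intro a acc h1 h2; omega
  | succ m ih =>
    intro a acc h1 h2
    have hab : (a : Int) < (t.length : Int) := by exact_mod_cast h2
    rw [pvRange5_cons _ _ hab, List.foldl_cons]
    have hcast : ((a : Int) + 5) = (((a + 5 : Nat)) : Int) := by push_cast; ring
    have hslice : PySem.List.slice t (some (a : Int)) (some ((a : Int) + 5)) =
        (t.drop a).take 5 := by
      rw [hcast, PySem.List.slice_natCast, Nat.add_sub_cancel_left]
    rw [hslice, hcast]
    by_cases h5 : t.length ≤ a + 5
    · rw [pvRange5_nil _ _ (by exact_mod_cast h5), List.foldl_nil]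
      rw [List.take_of_length_le (by rw [List.length_drop]; omega)]
    · rw [Nat.not_le] at h5
      rw [ih (a + 5) _ (by omega) h5]
      have hsplit : t.drop a = (t.drop a).take 5 ++ t.drop (a + 5) := by
        conv_lhs => rw [← List.take_append_drop 5 (t.drop a)]
        rw [List.drop_drop]
      have hx : ((t.drop a).take 5).map f ≠ [] := by
        simp only [ne_eq, List.map_eq_nil_iff, List.take_eq_nil_iff, List.drop_eq_nil_iff]
        omega
      have hy : (t.drop (a + 5)).map f ≠ [] := by
        simp only [ne_eq, List.map_eq_nil_iff, List.drop_eq_nil_iff]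
        omega
      rw [hsplit, List.map_append, pvJoin_append _ _ hx hy]
      simp [List.append_assoc]

-- replace(s, 'j', '') is exactly the filter dropping 'j' (single-char pattern, empty replacement)
theorem pvGoFilter : ∀ (fuel : Nat) (l acc : List Char),
    PySem.Chars.replace.go ['j'] [] fuel l acc
      = acc.reverse ++ (l.take fuel).filter (· ≠ 'j') ++ l.drop fuel := by
  intro fuel
  induction fuel with
  | zero => intro l acc; simp [PySem.Chars.replace.go]
  | succ f ih =>
    intro l acc
    cases l with
    | nil => simp [PySem.Chars.replace.go]
    | cons c t =>
      rw [PySem.Chars.replace.go]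
      by_cases hc : c = 'j'
      · subst hc
        rw [if_pos (by simp [List.isPrefixOf])]
        simp [ih]
      · rw [if_neg (by simp [List.isPrefixOf]; exact fun h => hc h.symm)]
        simp [ih, hc]

theorem pvReplaceFilter (l : List Char) :
    PySem.Chars.replace l ['j'] [] = l.filter (· ≠ 'j') := by
  rw [PySem.Chars.replace]
  simp [pvGoFilter]

-- index into an append when the element misses the left part
theorem pvIndexAppendNotMem (v : Char) (t : List Char) : ∀ l : List Char, v ∉ l →
    PySem.List.index? (l ++ t) v = (PySem.List.index? t v).map (· + l.length) := by
  intro l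
  induction l with
  | nil => intro _; simp [Option.map_id']
  | cons x l ih =>
    intro h
    rw [List.cons_append, PySem.List.index?_cons_of_ne _ (by simp at h; exact fun hv => h.1 hv.symm),
        ih (by simp at h; exact h.2)]
    cases PySem.List.index? t v with
    | none => simp
    | some k => simp; omega

-- the j-less alphabet A appends, as a literal
def pvAlpha : List Char := "abcdefghiklmnopqrstuvwxyz".toList

-- position in the j-less alphabet = B's ord() arithmetic (bounded decide over ASCII)
theorem pvAlphaIdxChar : ∀ n : Nat, n < 127 → PySem.Chars.isalpha (Char.ofNat n) = true →
    PySem.Chars.lowerChar (Char.ofNat n) ≠ 'j' →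
    PySem.List.index? pvAlpha (PySem.Chars.lowerChar (Char.ofNat n))
      = some ((PySem.Chars.lowerChar (Char.ofNat n)).toNat - 97
          - (if 'j' < PySem.Chars.lowerChar (Char.ofNat n) then 1 else 0)) := by decide

theorem pvLowerBounds : ∀ n : Nat, n < 127 → PySem.Chars.isalpha (Char.ofNat n) = true →
    97 ≤ (PySem.Chars.lowerChar (Char.ofNat n)).toNat ∧
    (PySem.Chars.lowerChar (Char.ofNat n)).toNat ≤ 122 ∧
    (106 < (PySem.Chars.lowerChar (Char.ofNat n)).toNat ↔ 'j' < PySem.Chars.lowerChar (Char.ofNat n)) := by decide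

theorem pvLowerJ : ∀ n : Nat, n < 127 → PySem.Chars.isalpha (Char.ofNat n) = true →
    PySem.Chars.lowerChar (Char.ofNat n) = 'j' → Char.ofNat n = 'j' ∨ Char.ofNat n = 'J' := by decide

-- per-letter agreement: A's scan of (kl ++ alphabet) = B's kod
theorem pvKodEq (kl : List Char) (x : Char)
    (hb : 97 ≤ x.toNat ∧ x.toNat ≤ 122 ∧ (106 < x.toNat ↔ 'j' < x))
    (hidx : x ≠ 'j' → PySem.List.index? pvAlpha x = some (x.toNat - 97 - (if 'j' < x then 1 else 0)))
    (hj : x = 'j' → 'j' ∈ kl) :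
    (((PySem.List.index? (kl ++ pvAlpha) x).getD 0 : Nat) : Int) = pvKod kl x := by
  unfold pvKod
  cases h : PySem.List.index? kl x with
  | some i =>
    rw [PySem.List.index?_append_of_mem _ ((PySem.List.index?_isSome_iff _ _).mp (by rw [h]; rfl)), h]
    simp
  | none =>
    have hnm : x ∉ kl := (PySem.List.index?_eq_none_iff _ _).mp h
    have hxj : x ≠ 'j' := fun he => hnm (he ▸ hj he)
    rw [pvIndexAppendNotMem _ _ _ hnm, hidx hxj]
    simp only [Option.map_some, Option.getD_some]
    by_cases hlt : 'j' < x
    · rw [if_pos hlt, if_pos hlt]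
      have : 106 < x.toNat := hb.2.2.mpr hlt
      push_cast; omega
    · rw [if_neg hlt, if_neg hlt]
      have : ¬ 106 < x.toNat := fun hc => hlt (hb.2.2.mp hc)
      push_cast; omega

-- ===== VERDICT (by name: the statement is the Claim_ definition above) =====
theorem ottendorf_kodowanie_spec : Claim_equal_ottendorf_kodowanie := by
  intro tekst klucz hdom hpre
  unfold Spec_ottendorf_kodowanie ottendorf_kodowanie ottendorf_kodowanie_alt
  dsimp only
  set kl := PySem.Chars.lower (PySem.Chars.replace klucz.toList ['j'] []) with hkl
  have halpha : PySem.Chars.replace "abcdefghijklmnopqrstuvwxyz".toList ['j'] [] = pvAlpha := by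
    decide
  rw [halpha]
  set t := tekst.toList.filter (fun litera => PySem.Chars.isalpha litera) with ht
  -- Dom bound on all chars of tekst
  have hdomT : ∀ c ∈ tekst.toList, c.toNat < 127 := by
    have := (Bool.and_eq_true _ _).mp hdom
    intro c hc
    have hall := (List.all_eq_true.mp this.1) c hc
    unfold pvDomChar at hall
    simp only [Bool.or_eq_true, Bool.and_eq_true, decide_eq_true_eq, beq_iff_eq] at hall
    omega
  -- per-char equality of the two mapped functions on members of t
  have hchar : ∀ ch ∈ t,
      (((PySem.List.index? (kl ++ pvAlpha) (PySem.Chars.lowerChar ch)).getD 0 : Nat) : Int)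
        = pvKod kl (PySem.Chars.lowerChar ch) := by
    intro ch hch
    obtain ⟨hmem, halp⟩ := List.mem_filter.mp (ht ▸ hch)
    have hn : ch.toNat < 127 := hdomT ch hmem
    have hofn : Char.ofNat ch.toNat = ch := Char.ofNat_toNat ch
    have halp' : PySem.Chars.isalpha (Char.ofNat ch.toNat) = true := by rw [hofn]; exact halp
    refine pvKodEq kl _ (by have := pvLowerBounds ch.toNat hn halp'; rwa [hofn] at this)
      (fun hne => by
        have := pvAlphaIdxChar ch.toNat hn halp' (by rwa [hofn])
        rwa [hofn] at this)
      (fun hje => ?_)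
    -- lowerChar ch = 'j' ⇒ ch ∈ {'j','J'} ⇒ Pre_ gives 'J' ∈ klucz ⇒ 'j' ∈ kl
    have hJk : 'J' ∈ klucz.toList := by
      have hcj := pvLowerJ ch.toNat hn halp' (by rwa [hofn])
      rw [hofn] at hcj
      rcases hcj with h | h
      · exact hpre (Or.inl (h ▸ hmem))
      · exact hpre (Or.inr (h ▸ hmem))
    rw [hkl, pvReplaceFilter]
    unfold PySem.Chars.lower
    exact List.mem_map.mpr ⟨'J', List.mem_filter.mpr ⟨hJk, by decide⟩, by decide⟩
  simp only [List.map_map]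
  refine congrArg String.ofList ?_
  set F := (fun liczba => PySem.Int.toChars liczba) ∘
      (fun litera => ((PySem.List.index? (kl ++ pvAlpha) (PySem.Chars.lowerChar litera)).getD 0 : Int)) with hF
  by_cases hT : t = []
  · rw [hT]
    simp only [List.length_nil, Nat.cast_zero, List.map_nil, List.foldl_nil,
      pvRange5_nil 0 0 le_rfl]
    decide
  · have hlen : 0 < t.length := List.length_pos_of_ne_nil hT
    have hfold := pvChunkFold F t t.length 0 [] (by omega) hlen
    rw [Nat.cast_zero] at hfold
    rw [hfold, List.drop_zero, List.nil_append]
    refine (pvStrip_join (t.map F) (by simpa using hT) ?_).trans ?_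
    · intro p hpmem
      obtain ⟨ch, _, rfl⟩ := List.mem_map.mp hpmem
      simp only [hF, Function.comp_apply]
      exact ⟨(pvToChars_ns _).1, (pvToChars_ns _).2⟩
    · refine congrArg (PySem.Chars.join [' ']) ?_
      apply List.map_congr_left
      intro ch hch
      simp only [hF, Function.comp_apply]
      rw [hchar ch hch]
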